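-- pv_equiv track=rewrite | github.com/hearot/CostituzioneBot | bot.py | get_article
-- ===== SOURCE A (Python) =====
-- def get_article(article: str) -> str:
--     """It adjusts the given line
--     to create the final string.
--     It deletes useless space and it sums
--     words split in two lines.
--
--     Args:
--         article (str): The given article you would like to adjust
--
--     Returns:
--         str: The adjusted string
--     """
--
--     final_string, current_string, complete_word = '', [], ''
--     completing_word = False
--
--     for word in [line.strip() for line in article.split()]:
--         if completing_word:
--             current_string.append(complete_word + word)
--             completing_word, complete_word = False, ''
--         elif word.endswith('-'):
--             completing_word = True
--             complete_word = word.replace('-', '')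
--         elif (not word.endswith('.') and not word.endswith(';') and not word.endswith(':')) or word == 'n.':
--             current_string.append(word)
--         else:
--             current_string.append(word)
--             final_string += ' '.join(current_string) + '\n'
--             current_string.clear()
--
--     return final_string.rstrip()
-- ===== SOURCE B (Python) =====
-- def get_article(article: str) -> str:
--     """Two-pass reflow: first glue hyphen-split words into (token, is_glued)
--     pairs, then group tokens into sentences and join with newlines."""
--     words = [line.strip() for line in article.split()]
--
--     # Pass 1: glue words split across lines; a trailing dangling hyphenated
--     # word is dropped.
--     tokens = []
--     pending = None
--     for w in words:
--         if pending is not None: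
--             tokens.append((pending + w, True))
--             pending = None
--         elif w.endswith('-'):
--             pending = w.replace('-', '')
--         else:
--             tokens.append((w, False))
--
--     # Pass 2: collect tokens into sentences; a non-glued token ending in
--     # '.', ';' or ':' (other than 'n.') closes the current sentence.
--     sentences = []
--     current = []
--     for tok, glued in tokens:
--         current.append(tok)
--         if not glued and tok.endswith(('.', ';', ':')) and tok != 'n.':
--             sentences.append(' '.join(current))
--             current = []
--
--     return '\n'.join(sentences)
-- ===== Notes on version B (the rewrite author's own statement) =====
-- stated objective: alternative
-- what changed: Replaces A's single-pass four-variable state machine with string += accumulation and a final rstrip by two explicit passes - first gluing hyphen-split words into (token, glued) pairs, then grouping tokens into a sentence list - joined once with newline separators.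
import Mathlib
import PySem

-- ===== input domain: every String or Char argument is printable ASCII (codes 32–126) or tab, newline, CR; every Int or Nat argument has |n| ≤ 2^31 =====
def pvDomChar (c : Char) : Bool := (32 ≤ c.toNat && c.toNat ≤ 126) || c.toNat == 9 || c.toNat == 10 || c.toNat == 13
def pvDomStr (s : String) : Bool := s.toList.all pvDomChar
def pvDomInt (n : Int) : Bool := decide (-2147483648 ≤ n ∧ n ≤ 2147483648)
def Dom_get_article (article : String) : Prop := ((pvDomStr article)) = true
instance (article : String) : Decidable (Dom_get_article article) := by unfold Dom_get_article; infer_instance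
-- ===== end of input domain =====

-- B replaces A's one-pass four-field state machine by two passes (glue hyphenated
-- words into (token, glued) pairs, then group into sentences) and a final '\n'-join
-- instead of repeated concatenation plus a trailing rstrip; objective: alternative.

-- ===== PORT A =====
-- state: (final_string, current_string, complete_word, completing_word)
def aStep (st : String × List String × String × Bool) (word : String) :
    String × List String × String × Bool :=
  if st.2.2.2 then
    (st.1, st.2.1 ++ [st.2.2.1 ++ word], "", false)
  else if PySem.Str.endswith word "-" then
    (st.1, st.2.1, PySem.Str.replace word "-" "", true)
  else if ((!PySem.Str.endswith word ".") && (!PySem.Str.endswith word ";")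
            && (!PySem.Str.endswith word ":")) || (word == "n.") then
    (st.1, st.2.1 ++ [word], st.2.2.1, st.2.2.2)
  else
    (st.1 ++ PySem.Str.join " " (st.2.1 ++ [word]) ++ "\n", [], st.2.2.1, st.2.2.2)

def get_article (article : String) : String :=
  let words := (PySem.Str.split₀ article).map PySem.Str.strip
  PySem.Str.rstrip (words.foldl aStep ("", [], "", false)).1

-- ===== PORT B =====
-- pass 1: glue words split across lines; a trailing dangling hyphenated word is dropped
def glue : List String → Option String → List (String × Bool)
  | [], _ => []
  | w :: ws, some p => (p ++ w, true) :: glue ws none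
  | w :: ws, none =>
    if PySem.Str.endswith w "-" then glue ws (some (PySem.Str.replace w "-" ""))
    else (w, false) :: glue ws none

def isFlush (tok : String) (glued : Bool) : Bool :=
  !glued && (PySem.Str.endswith tok "." || PySem.Str.endswith tok ";"
              || PySem.Str.endswith tok ":") && !(tok == "n.")

-- pass 2: collect tokens into sentences; state (sentences, current)
def sentStep (st : List String × List String) (t : String × Bool) :
    List String × List String :=
  let cur := st.2 ++ [t.1]
  if isFlush t.1 t.2 then (st.1 ++ [PySem.Str.join " " cur], []) else (st.1, cur)

def get_article_alt (article : String) : String :=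
  let words := (PySem.Str.split₀ article).map PySem.Str.strip
  PySem.Str.join "\n" ((glue words none).foldl sentStep ([], [])).1

-- ===== PRECONDITION & SPEC =====
def Spec_get_article (article : String) (out : String) : Prop := out = get_article_alt article
instance (article : String) (out : String) : Decidable (Spec_get_article article out) := by unfold Spec_get_article; infer_instance

-- ===== CLAIM (what is proved, stated in full; the proofs are below) =====
def Claim_equal_get_article : Prop := ∀ (article : String), Dom_get_article article → Spec_get_article article (get_article article)

-- ===== LEMMAS AND PROOFS =====

-- A's final_string is exactly this accumulation of B's sentence list
def strcat (parts : List String) : String :=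
  parts.foldl (fun a p => a ++ p ++ "\n") ""

theorem strcat_concat (ps : List String) (x : String) :
    strcat (ps ++ [x]) = strcat ps ++ x ++ "\n" := by
  simp [strcat]

-- the fused-loop invariant: A's fold equals strcat of B's two passes
theorem main_inv : ∀ (ws : List String) (pend : Option String) (parts cur : List String),
    (ws.foldl aStep (strcat parts, cur, pend.getD "", pend.isSome)).1
      = strcat ((glue ws pend).foldl sentStep (parts, cur)).1 := by
  intro ws
  induction ws with
  | nil => intro pend parts cur; cases pend <;> simp [glue]
  | cons w ws ih =>
    intro pend parts cur
    cases pend with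
    | some p =>
      have h := ih none parts (cur ++ [p ++ w])
      simpa [glue, aStep, sentStep, isFlush] using h
    | none =>
      cases hh : PySem.Str.endswith w "-" with
      | true =>
        have h := ih (some (PySem.Str.replace w "-" "")) parts cur
        simp only [Option.getD_some, Option.isSome_some] at h
        simp at hh
        simpa [glue, aStep, hh] using h
      | false =>
        simp at hh
        cases h1 : PySem.Str.endswith w "." <;>
        cases h2 : PySem.Str.endswith w ";" <;>
        cases h3 : PySem.Str.endswith w ":" <;>
        cases h4 : (w == "n.") <;>
        simp at h1 h2 h3 h4 <;>
        first
        | (have h := ih none parts (cur ++ [w])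
           simp only [Option.getD_none, Option.isSome_none] at h
           simpa [glue, aStep, sentStep, isFlush, hh, h1, h2, h3, h4] using h)
        | (have h := ih none (parts ++ [PySem.Str.join " " (cur ++ [w])]) []
           simp only [Option.getD_none, Option.isSome_none] at h
           rw [strcat_concat] at h
           simpa [glue, aStep, sentStep, isFlush, hh, h1, h2, h3, h4] using h)

-- a string whose last character is not whitespace
def endsNonspace (s : String) : Bool :=
  match s.toList.getLast? with
  | none => false
  | some c => !PySem.Chars.isspace c

theorem join_concat (sep : List Char) (xs : List (List Char)) (y : List Char) (hxs : xs ≠ []) :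
    PySem.Chars.join sep (xs ++ [y]) = PySem.Chars.join sep xs ++ sep ++ y := by
  induction xs with
  | nil => exact absurd rfl hxs
  | cons x xs ih =>
    cases xs with
    | nil => simp [PySem.Chars.join_cons_cons, PySem.Chars.join_singleton]
    | cons x' xs' =>
      have ih' := ih (by simp)
      simp only [List.cons_append] at ih' ⊢
      rw [PySem.Chars.join_cons_cons, ih', PySem.Chars.join_cons_cons]
      simp [List.append_assoc]

theorem join_suffix (sep : List Char) (xs : List (List Char)) (y : List Char) :
    y <:+ PySem.Chars.join sep (xs ++ [y]) := by
  cases xs with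
  | nil => simp [PySem.Chars.join_singleton]
  | cons x xs' =>
    rw [join_concat sep (x :: xs') y (by simp)]
    exact List.suffix_append _ _

-- every flushed sentence ends with its closing punctuation mark
theorem flush_good (cur : List String) (w : String)
    (hf : isFlush w false = true) :
    endsNonspace (PySem.Str.join " " (cur ++ [w])) = true := by
  simp [isFlush] at hf
  obtain ⟨he, -⟩ := hf
  have hend : ∃ c, PySem.Chars.isspace c = false ∧ [c] <:+ w.toList := by
    rcases he with (h | h) | h
    · exact ⟨'.', by decide, (PySem.Chars.endswith_iff _ _).1 h⟩
    · exact ⟨';', by decide, (PySem.Chars.endswith_iff _ _).1 h⟩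
    · exact ⟨':', by decide, (PySem.Chars.endswith_iff _ _).1 h⟩
  obtain ⟨c, hc, t, ht⟩ := hend
  obtain ⟨T, hT⟩ := join_suffix [' '] (cur.map String.toList) w.toList
  have hlast : (PySem.Chars.join [' '] (cur.map String.toList ++ [w.toList])).getLast?
      = some c := by
    rw [← hT, ← ht]
    simp
  simp [endsNonspace, hlast, hc]

theorem parts_good : ∀ (toks : List (String × Bool)) (parts cur : List String),
    (∀ p ∈ parts, endsNonspace p = true) →
    ∀ p ∈ (toks.foldl sentStep (parts, cur)).1, endsNonspace p = true := by
  intro toks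
  induction toks with
  | nil => intro parts cur h p hp; exact h p hp
  | cons t ts ih =>
    intro parts cur h
    rw [List.foldl_cons]
    unfold sentStep
    cases hf : isFlush t.1 t.2 with
    | false => simp only [Bool.false_eq_true, if_false]; exact ih parts (cur ++ [t.1]) h
    | true =>
      simp only [if_true]
      refine ih _ [] ?_
      intro p hp
      rcases List.mem_append.1 hp with h1 | h1
      · exact h p h1
      · have ht2 : t.2 = false := by
          cases t2 : t.2
          · rfl
          · rw [t2] at hf; simp [isFlush] at hf
        rw [ht2] at hf
        rcases List.mem_singleton.1 h1 with rfl
        exact flush_good cur t.1 hf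

theorem strcat_toList : ∀ (P : List String), P ≠ [] →
    (strcat P).toList = (PySem.Str.join "\n" P).toList ++ ['\n'] := by
  intro P
  induction P using List.reverseRecOn with
  | nil => intro h; exact absurd rfl h
  | append_singleton P p ih =>
    intro _
    rw [strcat_concat]
    rcases eq_or_ne P [] with rfl | hP
    · simp [strcat]
    · have hmap : P.map String.toList ≠ [] := by simpa using hP
      simp only [String.toList_append]
      rw [ih hP]
      have : (PySem.Str.join "\n" (P ++ [p])).toList
          = (PySem.Str.join "\n" P).toList ++ ['\n'] ++ p.toList := by
        simp [join_concat ['\n'] (P.map String.toList) p.toList hmap]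
      rw [this]
      simp

theorem rstrip_concat_newline (K : List Char) (c : Char) (hc : PySem.Chars.isspace c = false) :
    PySem.Chars.rstrip (K ++ [c] ++ ['\n']) = K ++ [c] := by
  simp [PySem.Chars.rstrip, List.dropWhile, hc]
  rfl

theorem rstrip_strcat (P : List String) (h : ∀ p ∈ P, endsNonspace p = true) :
    PySem.Str.rstrip (strcat P) = PySem.Str.join "\n" P := by
  rcases List.eq_nil_or_concat P with rfl | ⟨Q, r, rfl⟩
  · rfl
  · simp only [List.concat_eq_append] at h ⊢
    apply String.toList_injective
    have hr : endsNonspace r = true := h r (by simp)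
    unfold endsNonspace at hr
    rcases hl : r.toList.getLast? with _ | c
    · rw [hl] at hr; simp at hr
    · rw [hl] at hr
      simp only [Bool.not_eq_true'] at hr
      obtain ⟨t, ht⟩ := (List.getLast?_eq_some_iff).1 hl
      obtain ⟨T, hT⟩ := join_suffix ['\n'] (Q.map String.toList) r.toList
      have hJ : (PySem.Str.join "\n" (Q ++ [r])).toList = (T ++ t) ++ [c] := by
        have : (PySem.Str.join "\n" (Q ++ [r])).toList
            = PySem.Chars.join ['\n'] (Q.map String.toList ++ [r.toList]) := by simp
        rw [this, ← hT, ht]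
        simp
      rw [PySem.Str.toList_rstrip, strcat_toList _ (by simp), hJ]
      exact rstrip_concat_newline (T ++ t) c hr

-- ===== VERDICT (by name: the statement is the Claim_ definition above) =====
theorem get_article_spec : Claim_equal_get_article := by
  intro article _
  unfold Spec_get_article
  show PySem.Str.rstrip
      (List.foldl aStep ("", [], "", false) ((PySem.Str.split₀ article).map PySem.Str.strip)).1
    = PySem.Str.join "\n"
      (List.foldl sentStep ([], []) (glue ((PySem.Str.split₀ article).map PySem.Str.strip) none)).1
  have h := main_inv ((PySem.Str.split₀ article).map PySem.Str.strip) none [] []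
  simp only [Option.getD_none, Option.isSome_none] at h
  have h2 : (List.foldl aStep ("", [], "", false) ((PySem.Str.split₀ article).map PySem.Str.strip)).1
      = strcat (List.foldl sentStep ([], [])
          (glue ((PySem.Str.split₀ article).map PySem.Str.strip) none)).1 := h
  rw [h2]
  exact rstrip_strcat _ (parts_good _ [] [] (by intro p hp; cases hp))
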